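-- pv_equiv track=rewrite | github.com/gavrilovAlikhan/AI-Tetrirs | tetris.py | calculateBumpiness
-- ===== SOURCE A (Python) =====
-- def calculateBumpiness(grid):
--     bumpiness = 0
--
--     # Get column height
--     def col_height(col):
--         for row in range(len(grid)):
--             if grid[row][col] != (0, 0, 0):
--                 return len(grid) - row
--         return 0
--
--     # Calculate the absolute difference
--     for col in range(len(grid[0]) - 1):
--         left_height = col_height(col)
--         right_height = col_height(col + 1)
--         bumpiness += abs(left_height - right_height)
--
--     return bumpiness
-- ===== SOURCE B (Python) =====
-- def calculateBumpiness(grid):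
--     num_cols = len(grid[0])
--     n = len(grid)
--     # Row-major sweep: rebuild the column-height vector once per row, top-down.
--     heights = [0] * num_cols
--     for i, row in enumerate(grid):
--         heights = [n - i if h == 0 and row[c] != (0, 0, 0) else h
--                    for c, h in enumerate(heights)]
--     # Separate pairwise pass over adjacent heights.
--     return sum(abs(b - a) for a, b in zip(heights, heights[1:]))
-- ===== Notes on version B (the rewrite author's own statement) =====
-- stated objective: alternative
-- what changed: B replaces A's fused per-pair column-major scans (each adjacent pair re-scans both columns top-down) by a single row-major sweep that rebuilds a column-height vector once per row, followed by a separate pairwise pass summing abs differences over zip(heights, heights[1:]).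
-- outside the precondition, e.g. on calculateBumpiness([[(0, 0, 0)], []]): A returns 0, B raises IndexError
import Mathlib
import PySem

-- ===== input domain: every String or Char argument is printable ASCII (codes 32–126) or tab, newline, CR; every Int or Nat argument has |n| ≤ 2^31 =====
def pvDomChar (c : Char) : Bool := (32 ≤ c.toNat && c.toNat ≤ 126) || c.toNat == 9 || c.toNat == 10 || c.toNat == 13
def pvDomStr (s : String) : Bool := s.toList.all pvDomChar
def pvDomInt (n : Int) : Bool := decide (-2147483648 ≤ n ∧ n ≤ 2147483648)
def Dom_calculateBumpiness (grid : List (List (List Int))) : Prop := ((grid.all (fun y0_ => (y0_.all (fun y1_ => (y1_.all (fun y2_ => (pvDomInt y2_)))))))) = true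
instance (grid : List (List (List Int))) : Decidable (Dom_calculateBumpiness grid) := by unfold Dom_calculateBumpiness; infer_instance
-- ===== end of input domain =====

-- B replaces A's fused per-pair column-major scans by one row-major sweep that rebuilds a
-- column-height vector per row, then a separate pairwise pass (alternative decomposition, same cost).

-- ===== PORT A =====
-- A's inner `col_height`: scan rows top-down for the first cell != (0, 0, 0)
def colHeightA (nRows row : Int) (rows : List (List (List Int))) (col : Int) : Int :=
  match rows with
  | [] => 0
  | r :: rest =>
      if PySem.List.pyGetD r col [] != [0, 0, 0] then nRows - row
      else colHeightA nRows (row + 1) rest col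

def calculateBumpiness (grid : List (List (List Int))) : Int :=
  (PySem.List.pyRange 0 (((PySem.List.pyGetD grid 0 []).length : Int) - 1) 1).foldl
    (fun bumpiness col =>
      let leftHeight := colHeightA (grid.length : Int) 0 grid col
      let rightHeight := colHeightA (grid.length : Int) 0 grid (col + 1)
      bumpiness + |leftHeight - rightHeight|) 0

-- ===== PORT B =====
-- Source B's per-row comprehension: rebuild the heights vector from row number `i`
def stepRow (n i : Int) (row : List (List Int)) (hs : List Int) : List Int :=
  (PySem.List.enumerate hs 0).map
    (fun q => if q.2 == 0 && (PySem.List.pyGetD row q.1 [] != [0, 0, 0]) then n - i else q.2)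

def calculateBumpiness_alt (grid : List (List (List Int))) : Int :=
  let numCols : Int := ((PySem.List.pyGetD grid 0 []).length : Int)
  let n : Int := (grid.length : Int)
  let heights : List Int :=
    (PySem.List.enumerate grid 0).foldl (fun hs p => stepRow n p.1 p.2 hs)
      (List.replicate numCols.toNat 0)
  (heights.zip heights.tail).foldl (fun acc p => acc + |p.2 - p.1|) 0

-- ===== PRECONDITION & SPEC =====
-- Pre_ excludes the empty grid (A raises IndexError at grid[0]) and grids where some column
-- c < len(grid[0]) meets a row shorter than c+1 before a filled cell: there the scans raise
-- IndexError — A's when it scans that column (num_cols ≥ 2), B's always, so both go outside Pre_.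
def Pre_calculateBumpiness (grid : List (List (List Int))) : Prop :=
  grid ≠ [] ∧ ∀ c < grid.headI.length, ∀ i < grid.length,
    (grid.getD i []).length ≤ c →
      ∃ j < i, c < (grid.getD j []).length ∧ (grid.getD j []).getD c [] ≠ [0, 0, 0]
instance (grid : List (List (List Int))) : Decidable (Pre_calculateBumpiness grid) := by
  unfold Pre_calculateBumpiness; infer_instance
def pvWitness_calculateBumpiness : List (List (List Int)) :=
  [[[0, 0, 0], [1, 2, 3]], [[5, 5, 5], [0, 0, 0]]]

def Spec_calculateBumpiness (grid : List (List (List Int))) (out : Int) : Prop := out = calculateBumpiness_alt grid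
instance (grid : List (List (List Int))) (out : Int) : Decidable (Spec_calculateBumpiness grid out) := by unfold Spec_calculateBumpiness; infer_instance

-- ===== CLAIM (what is proved, stated in full; the proofs are below) =====
def Claim_equal_calculateBumpiness : Prop := ∀ (grid : List (List (List Int))), Dom_calculateBumpiness grid → Pre_calculateBumpiness grid → Spec_calculateBumpiness grid (calculateBumpiness grid)

-- ===== LEMMAS AND PROOFS =====

-- appending one row to the scanned prefix: the column height of the longer prefix, expressed
-- through the shorter one (0 = "not found yet"; sound because found heights are positive
-- under the bound row + rows.length < n)
theorem colHeightA_snoc (rows : List (List (List Int))) :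
    ∀ (n row : Int) (r : List (List Int)) (c : Int), row + rows.length < n →
    colHeightA n row (rows ++ [r]) c =
      if colHeightA n row rows c == 0 then
        (if PySem.List.pyGetD r c [] != [0, 0, 0] then n - (row + rows.length) else 0)
      else colHeightA n row rows c := by
  induction rows with
  | nil =>
      intro n row r c _
      simp only [List.nil_append, colHeightA, List.length_nil]
      split <;> simp
  | cons s t ih =>
      intro n row r c hlt
      simp only [List.cons_append, colHeightA]
      by_cases hs : (PySem.List.pyGetD s c [] != [0, 0, 0]) = true
      · have hlen : (0 : Int) < n - row := by
          simp only [List.length_cons] at hlt; push_cast at hlt ⊢; omega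
        simp only [hs, if_true]
        have : (n - row == 0) = false := by simp; omega
        simp [this]
      · simp only [Bool.not_eq_true] at hs
        simp only [hs, Bool.false_eq_true, if_false]
        have hlt' : (row + 1) + (t.length : Int) < n := by
          simp only [List.length_cons] at hlt; push_cast at hlt ⊢; omega
        rw [ih n (row + 1) r c hlt']
        have : (row + 1) + (t.length : Int) = row + ((s :: t).length : Int) := by
          simp only [List.length_cons]; push_cast; ring
        rw [this]

-- enumerating a comprehension over range(0, b) pairs each value with its own index
theorem enumerate_map_pyRange {α : Type} (f : Int → α) :
    ∀ (b a : Int), PySem.List.enumerate ((PySem.List.pyRange a b 1).map f) a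
      = (PySem.List.pyRange a b 1).map (fun c => (c, f c)) := by
  intro b
  suffices h : ∀ (k : Nat) (a : Int), (b - a).toNat = k →
      PySem.List.enumerate ((PySem.List.pyRange a b 1).map f) a
        = (PySem.List.pyRange a b 1).map (fun c => (c, f c)) by
    intro a; exact h (b - a).toNat a rfl
  intro k
  induction k with
  | zero =>
      intro a hk
      rw [PySem.List.pyRange_one_eq_nil (by omega)]
      rfl
  | succ k ih =>
      intro a hk
      rw [PySem.List.pyRange_one_cons (by omega)]
      simp only [List.map_cons, PySem.List.enumerate_cons]
      rw [ih (a + 1) (by omega)]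

-- the per-row comprehension acts pointwise on a heights vector given as a comprehension
theorem stepRow_map (n i b : Int) (row : List (List Int)) (f : Int → Int) :
    stepRow n i row ((PySem.List.pyRange 0 b 1).map f)
      = (PySem.List.pyRange 0 b 1).map
          (fun c => if f c == 0 && (PySem.List.pyGetD row c [] != [0, 0, 0]) then n - i else f c) := by
  unfold stepRow
  rw [enumerate_map_pyRange f b 0, List.map_map]
  rfl

-- one row of the sweep advances the scanned prefix by that row
theorem stepRow_advance (n b : Int) (pre : List (List (List Int))) (r : List (List Int))
    (hlt : (pre.length : Int) < n) :
    stepRow n (pre.length : Int) r ((PySem.List.pyRange 0 b 1).map (fun c => colHeightA n 0 pre c))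
      = (PySem.List.pyRange 0 b 1).map (fun c => colHeightA n 0 (pre ++ [r]) c) := by
  rw [stepRow_map]
  apply List.map_congr_left
  intro c _
  rw [colHeightA_snoc pre n 0 r c (by omega)]
  by_cases h0 : (colHeightA n 0 pre c == 0) = true
  · simp only [h0, if_true, Bool.true_and]
    split <;> · simp_all
  · simp only [Bool.not_eq_true] at h0
    simp [h0]

-- the whole sweep: folding the remaining rows over the prefix's heights yields the full heights
theorem foldl_stepRow (n b : Int) :
    ∀ (t pre : List (List (List Int))), n = ((pre ++ t).length : Int) →
    (PySem.List.enumerate t (pre.length : Int)).foldl (fun hs p => stepRow n p.1 p.2 hs)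
        ((PySem.List.pyRange 0 b 1).map (fun c => colHeightA n 0 pre c))
      = (PySem.List.pyRange 0 b 1).map (fun c => colHeightA n 0 (pre ++ t) c) := by
  intro t
  induction t with
  | nil => intro pre _; simp [PySem.List.enumerate_nil]
  | cons r t' ih =>
      intro pre hn
      have hlt : (pre.length : Int) < n := by
        simp only [List.length_append, List.length_cons] at hn; push_cast at hn; omega
      rw [PySem.List.enumerate_cons, List.foldl_cons, stepRow_advance n b pre r hlt]
      have hlen : ((pre ++ [r]).length : Int) = (pre.length : Int) + 1 := by
        simp
      have hn' : n = (((pre ++ [r]) ++ t').length : Int) := by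
        simpa using hn
      have := ih (pre ++ [r]) hn'
      rw [hlen] at this
      rw [this]
      simp

-- zipping a range comprehension with its own tail gives the adjacent pairs over range(0, b-1)
theorem zip_tail_pyRange (g : Int → Int) :
    ∀ (k : Nat) (a b : Int), (b - a).toNat = k →
    (((PySem.List.pyRange a b 1).map g).zip (((PySem.List.pyRange a b 1).map g).tail))
      = (PySem.List.pyRange a (b - 1) 1).map (fun c => (g c, g (c + 1))) := by
  intro k
  induction k with
  | zero =>
      intro a b hk
      rw [PySem.List.pyRange_one_eq_nil (a := a) (b := b) (by omega),
          PySem.List.pyRange_one_eq_nil (a := a) (b := b - 1) (by omega)]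
      rfl
  | succ k ih =>
      intro a b hk
      rw [PySem.List.pyRange_one_cons (by omega)]
      by_cases hb : a + 1 < b
      · rw [PySem.List.pyRange_one_cons (a := a + 1) (b := b) hb]
        have htl := ih (a + 1) b (by omega)
        rw [PySem.List.pyRange_one_cons (a := a + 1) (b := b) hb] at htl
        simp only [List.map_cons, List.tail_cons, List.zip_cons_cons] at htl ⊢
        rw [htl, PySem.List.pyRange_one_cons (a := a) (b := b - 1) (by omega)]
        simp
      · rw [PySem.List.pyRange_one_eq_nil (a := a + 1) (b := b) (by omega),
            PySem.List.pyRange_one_eq_nil (a := a) (b := b - 1) (by omega)]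
        rfl

-- the sweep's final heights vector is the column-height table
theorem heights_eq (grid : List (List (List Int))) :
    (PySem.List.enumerate grid 0).foldl
        (fun hs p => stepRow (grid.length : Int) p.1 p.2 hs)
        (List.replicate ((PySem.List.pyGetD grid 0 []).length : Int).toNat 0)
      = (PySem.List.pyRange 0 ((PySem.List.pyGetD grid 0 []).length : Int) 1).map
          (fun c => colHeightA (grid.length : Int) 0 grid c) := by
  have hbase : List.replicate ((PySem.List.pyGetD grid 0 []).length : Int).toNat (0 : Int)
      = (PySem.List.pyRange 0 ((PySem.List.pyGetD grid 0 []).length : Int) 1).map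
          (fun c => colHeightA (grid.length : Int) 0 [] c) := by
    have : (fun (c : Int) => colHeightA (grid.length : Int) 0 [] c) = fun _ => (0 : Int) := by
      funext c; rfl
    rw [this, List.map_const', PySem.List.length_pyRange_one]
    norm_num
  rw [hbase]
  have := foldl_stepRow (grid.length : Int) ((PySem.List.pyGetD grid 0 []).length : Int)
    grid [] (by simp)
  simpa using this

-- ===== VERDICT (by name: the statement is the Claim_ definition above) =====
theorem calculateBumpiness_spec : Claim_equal_calculateBumpiness := by
  intro grid _ _
  unfold Spec_calculateBumpiness
  have eA : calculateBumpiness grid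
      = (PySem.List.pyRange 0 (((PySem.List.pyGetD grid 0 []).length : Int) - 1) 1).foldl
          (fun bumpiness col =>
            bumpiness + |colHeightA (grid.length : Int) 0 grid col
              - colHeightA (grid.length : Int) 0 grid (col + 1)|) 0 := rfl
  have eB : calculateBumpiness_alt grid
      = (((PySem.List.enumerate grid 0).foldl
            (fun hs p => stepRow (grid.length : Int) p.1 p.2 hs)
            (List.replicate ((PySem.List.pyGetD grid 0 []).length : Int).toNat 0)).zip
          ((PySem.List.enumerate grid 0).foldl
            (fun hs p => stepRow (grid.length : Int) p.1 p.2 hs)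
            (List.replicate ((PySem.List.pyGetD grid 0 []).length : Int).toNat 0)).tail).foldl
          (fun acc p => acc + |p.2 - p.1|) 0 := rfl
  rw [eA, eB, heights_eq grid]
  rw [zip_tail_pyRange (fun c => colHeightA (grid.length : Int) 0 grid c)
    (((PySem.List.pyGetD grid 0 []).length : Int) - 0).toNat 0
    ((PySem.List.pyGetD grid 0 []).length : Int) rfl]
  rw [List.foldl_map]
  apply PySem.List.foldl_congr_mem
  intro acc c _
  rw [abs_sub_comm]
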